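-- pv_equiv track=rewrite | github.com/Yichun-Zhang-ZYC/2LCsolutions | question2.py | check_parentheses
-- ===== SOURCE A (Python) =====
-- def check_parentheses(strings):
--     outputs = []
--     for string in strings:
--         stack = []
--         marks = [' ' for _ in range(len(string))]
--
--         for i, ch in enumerate(string):
--             if ch == '(':
--                 stack.append(i)
--             elif ch == ')':
--                 if stack:
--                     stack.pop()
--                 else:
--                     marks[i] = '?'
--
--         for i in stack:
--             marks[i] = 'x'
--
--         outputs.append((string, ''.join(marks)))
--
--     return outputs
-- ===== SOURCE B (Python) =====
-- def check_parentheses(strings):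
--     outputs = []
--     for string in strings:
--         marks = [' '] * len(string)
--         bal = 0
--         for i, ch in enumerate(string):
--             if ch == '(':
--                 bal += 1
--             elif ch == ')':
--                 if bal > 0:
--                     bal -= 1
--                 else:
--                     marks[i] = '?'
--         cnt = 0
--         for i in range(len(string) - 1, -1, -1):
--             ch = string[i]
--             if ch == ')':
--                 cnt += 1
--             elif ch == '(':
--                 if cnt > 0:
--                     cnt -= 1
--                 else:
--                     marks[i] = 'x'
--         outputs.append((string, ''.join(marks)))
--     return outputs
-- ===== Notes on version B (the rewrite author's own statement) =====
-- stated objective: alternative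
-- what changed: Replaces the stack of '(' indices and the final mark-leftovers loop by two counter-based scans: a forward pass with an integer balance marking unmatched ')' and a backward pass with an integer close-counter marking unmatched '(', so no index stack is ever kept.
import Mathlib
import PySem

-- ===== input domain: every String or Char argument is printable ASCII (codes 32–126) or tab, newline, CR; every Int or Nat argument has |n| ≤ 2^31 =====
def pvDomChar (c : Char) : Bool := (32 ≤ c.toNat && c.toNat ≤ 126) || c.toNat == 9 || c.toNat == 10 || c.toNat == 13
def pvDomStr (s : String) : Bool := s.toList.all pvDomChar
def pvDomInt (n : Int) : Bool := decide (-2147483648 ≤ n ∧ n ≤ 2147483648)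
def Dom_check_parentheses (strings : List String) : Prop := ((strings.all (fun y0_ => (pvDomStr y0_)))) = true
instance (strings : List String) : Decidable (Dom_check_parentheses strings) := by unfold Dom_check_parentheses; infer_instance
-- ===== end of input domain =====

-- B replaces A's stack of '(' indices by a forward balance pass plus a backward close-counter
-- pass (two scalars instead of an index stack); same output, same O(n) cost (objective: alternative).

-- ===== PORT A =====
-- one step of A's forward loop: state = (stack of indices, marks list), input = (i, ch)
def chkStepA (p : List Int × List Char) (ic : Int × Char) : List Int × List Char :=
  if ic.2 = '(' then (p.1 ++ [ic.1], p.2)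
  else if ic.2 = ')' then
    (if p.1.isEmpty then (p.1, PySem.List.pySetD p.2 ic.1 '?') else (p.1.dropLast, p.2))
  else p

def check_parentheses (strings : List String) : List (String × String) :=
  strings.foldl (fun outputs string =>
    let cs := string.toList
    let p := (PySem.List.enumerate cs 0).foldl chkStepA ([], List.replicate cs.length ' ')
    let marks := p.1.foldl (fun m i => PySem.List.pySetD m i 'x') p.2
    outputs ++ [(string, String.ofList marks)]) []

-- ===== PORT B =====
-- one step of B's forward pass: state = (balance, marks)
def chkFwdB (p : Int × List Char) (ic : Int × Char) : Int × List Char :=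
  if ic.2 = '(' then (p.1 + 1, p.2)
  else if ic.2 = ')' then
    (if p.1 > 0 then (p.1 - 1, p.2) else (p.1, PySem.List.pySetD p.2 ic.1 '?'))
  else p

-- one step of B's backward pass (right-to-left, hence foldr): state = (close counter, marks)
def chkBackB (ic : Int × Char) (p : Int × List Char) : Int × List Char :=
  if ic.2 = ')' then (p.1 + 1, p.2)
  else if ic.2 = '(' then
    (if p.1 > 0 then (p.1 - 1, p.2) else (p.1, PySem.List.pySetD p.2 ic.1 'x'))
  else p

def check_parentheses_alt (strings : List String) : List (String × String) :=
  strings.map (fun string =>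
    let cs := string.toList
    let fwd := (PySem.List.enumerate cs 0).foldl chkFwdB (0, List.replicate cs.length ' ')
    let bck := (PySem.List.enumerate cs 0).foldr chkBackB (0, fwd.2)
    (string, String.ofList bck.2))

-- ===== PRECONDITION & SPEC =====
def Spec_check_parentheses (strings : List String) (out : List (String × String)) : Prop := out = check_parentheses_alt strings
instance (strings : List String) (out : List (String × String)) : Decidable (Spec_check_parentheses strings out) := by unfold Spec_check_parentheses; infer_instance

-- ===== CLAIM (what is proved, stated in full; the proofs are below) =====
def Claim_equal_check_parentheses : Prop := ∀ (strings : List String), Dom_check_parentheses strings → Spec_check_parentheses strings (check_parentheses strings)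

-- ===== LEMMAS AND PROOFS =====

-- number of ')' in t left unmatched within t (what B's backward counter computes)
def cntC : List Char → Int
  | [] => 0
  | c :: t => if c = ')' then cntC t + 1
      else if c = '(' then (if cntC t > 0 then cntC t - 1 else cntC t)
      else cntC t

-- A's stack evolution, extracted as a plain recursion
def stackRun : List Int → Int → List Char → List Int
  | st, _, [] => st
  | st, s, c :: t =>
      if c = '(' then stackRun (st ++ [s]) (s + 1) t
      else if c = ')' then (if st.isEmpty then stackRun st (s + 1) t else stackRun st.dropLast (s + 1) t)
      else stackRun st (s + 1) t

lemma cntC_nonneg : ∀ t : List Char, 0 ≤ cntC t := by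
  intro t; induction t with
  | nil => simp [cntC]
  | cons c t ih => simp only [cntC]; split_ifs <;> omega

lemma fwd_eq : ∀ (t : List Char) (s : Int) (st : List Int) (bal : Int) (m : List Char),
    bal = st.length →
    (PySem.List.enumerate t s).foldl chkStepA (st, m) =
      (stackRun st s t, ((PySem.List.enumerate t s).foldl chkFwdB (bal, m)).2) := by
  intro t
  induction t with
  | nil => intro s st bal m h; simp [PySem.List.enumerate_nil, stackRun]
  | cons c t ih =>
    intro s st bal m h
    rw [PySem.List.enumerate_cons]
    by_cases hc : c = '('
    · simp only [List.foldl_cons, chkStepA, chkFwdB, hc, if_pos rfl, stackRun]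
      exact ih (s + 1) (st ++ [s]) (bal + 1) m (by simp [h])
    · by_cases hc2 : c = ')'
      · rcases eq_or_ne st [] with hst | hst
        · have hb : bal = 0 := by simp [hst] at h; exact_mod_cast h
          simp only [List.foldl_cons, chkStepA, chkFwdB, hc, hc2, if_neg, if_pos rfl, stackRun,
            hst, List.isEmpty_nil, if_pos rfl, hb]
          simpa using ih (s + 1) [] 0 (PySem.List.pySetD m s '?') (by simp)
        · have hlen : 0 < st.length := List.length_pos_iff.mpr hst
          have hb : bal > 0 := by omega
          simp only [List.foldl_cons, chkStepA, chkFwdB, hc, hc2, if_neg, if_pos rfl, stackRun,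
            List.isEmpty_iff, hst, if_pos hb]
          simpa [hst] using ih (s + 1) st.dropLast (bal - 1) m
            (by simp [List.length_dropLast]; omega)
      · simp only [List.foldl_cons, chkStepA, chkFwdB, hc, hc2, if_neg, stackRun]
        exact ih (s + 1) st bal m h

lemma take_dropLast (l : List Int) (k : Nat) (hk : k ≤ l.length - 1) :
    l.dropLast.take k = l.take k := by
  rw [List.dropLast_eq_take, List.take_take]
  congr 1
  omega

lemma stackRun_split : ∀ (t : List Char) (s : Int) (st : List Int),
    stackRun st s t = st.take (st.length - (cntC t).toNat) ++ stackRun [] s t := by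
  intro t
  induction t with
  | nil => intro s st; simp [stackRun, cntC]
  | cons c t ih =>
    intro s st
    by_cases hc : c = '('
    · subst hc
      simp only [stackRun, cntC, reduceIte, Char.reduceEq, List.nil_append]
      rw [ih (s + 1) (st ++ [s]), ih (s + 1) [s]]
      have hnn := cntC_nonneg t
      rcases eq_or_lt_of_le hnn with h0 | hpos
      · simp only [← h0]
        rw [List.take_of_length_le (by simp)]
        simp
      · have hk : 1 ≤ (cntC t).toNat := by omega
        have h1 : st.length + 1 - (cntC t).toNat ≤ st.length := by simp; omega
        rw [List.take_append_of_le_length (by simpa using h1)]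
        simp only [if_pos hpos]
        have e1 : (st ++ [s]).length - (cntC t).toNat = st.length - (cntC t - 1).toNat := by
          simp only [List.length_append, List.length_cons, List.length_nil]
          omega
        have e2 : [s].length - (cntC t).toNat = 0 := by
          simp only [List.length_cons, List.length_nil]
          omega
        rw [e1, e2, List.take_zero, List.nil_append]
    · by_cases hc2 : c = ')'
      · rcases eq_or_ne st [] with hst | hst
        · subst hst
          simp [stackRun, hc, hc2, cntC]
        · have hlen : 0 < st.length := List.length_pos_iff.mpr hst
          simp only [stackRun, hc, hc2, if_neg, if_pos rfl, cntC, List.isEmpty_iff, hst]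
          rw [ih (s + 1) st.dropLast]
          have hnn := cntC_nonneg t
          have hEq : st.dropLast.length - (cntC t).toNat = st.length - (cntC t + 1).toNat := by
            simp [List.length_dropLast]; omega
          rw [hEq, take_dropLast st _ (by omega)]
          simp [hst]
      · simp only [stackRun, hc, hc2, if_neg, cntC]
        exact ih (s + 1) st

lemma mem_stackRun : ∀ (t : List Char) (s : Int) (st : List Int) (i : Int),
    i ∈ stackRun st s t → i ∈ st ∨ s ≤ i := by
  intro t
  induction t with
  | nil => intro s st i h; simp [stackRun] at h; exact Or.inl h
  | cons c t ih =>
    intro s st i h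
    simp only [stackRun] at h
    split_ifs at h with h1 h2 h3
    · rcases ih (s + 1) (st ++ [s]) i h with hm | hs
      · rcases List.mem_append.mp hm with hm | hm
        · exact Or.inl hm
        · simp at hm; omega
      · omega
    · rcases ih (s + 1) st i h with hm | hs
      · exact Or.inl hm
      · omega
    · rcases ih (s + 1) st.dropLast i h with hm | hs
      · exact Or.inl (List.dropLast_subset _ hm)
      · omega
    · rcases ih (s + 1) st i h with hm | hs
      · exact Or.inl hm
      · omega

lemma foldlx_set (S : List Int) (m : List Char) (j : Int) (hj : 0 ≤ j)
    (hS : ∀ i ∈ S, 0 ≤ i ∧ j ≠ i) :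
    S.foldl (fun m i => PySem.List.pySetD m i 'x') (PySem.List.pySetD m j 'x') =
      PySem.List.pySetD (S.foldl (fun m i => PySem.List.pySetD m i 'x') m) j 'x' := by
  induction S generalizing m with
  | nil => simp
  | cons i S ih =>
    obtain ⟨hi0, hne⟩ := hS i (List.mem_cons_self)
    have hcomm : PySem.List.pySetD (PySem.List.pySetD m j 'x') i 'x' =
        PySem.List.pySetD (PySem.List.pySetD m i 'x') j 'x' := by
      rw [PySem.List.pySetD_of_nonneg m 'x' hj, PySem.List.pySetD_of_nonneg _ 'x' hi0,
        PySem.List.pySetD_of_nonneg m 'x' hi0, PySem.List.pySetD_of_nonneg _ 'x' hj,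
        List.set_comm]
      omega
    simp only [List.foldl_cons, hcomm]
    exact ih _ (fun i hi => hS i (List.mem_cons_of_mem _ hi))

lemma back_cnt : ∀ (t : List Char) (s : Int) (m : List Char),
    ((PySem.List.enumerate t s).foldr chkBackB (0, m)).1 = cntC t := by
  intro t
  induction t with
  | nil => intro s m; simp [PySem.List.enumerate_nil, cntC]
  | cons c t ih =>
    intro s m
    rw [PySem.List.enumerate_cons, List.foldr_cons]
    simp only [chkBackB, cntC]
    split_ifs with h1 h2 h3 <;> simp [ih (s + 1) m] <;> rw [ih (s + 1) m] at * <;> omega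

lemma back_eq : ∀ (t : List Char) (s : Int) (m : List Char), 0 ≤ s →
    ((PySem.List.enumerate t s).foldr chkBackB (0, m)).2 =
      (stackRun [] s t).foldl (fun m i => PySem.List.pySetD m i 'x') m := by
  intro t
  induction t with
  | nil => intro s m _; simp [PySem.List.enumerate_nil, stackRun]
  | cons c t ih =>
    intro s m hs
    rw [PySem.List.enumerate_cons, List.foldr_cons]
    have hcnt := back_cnt t (s + 1) m
    have hm := ih (s + 1) m (by omega)
    by_cases hc : c = '('
    · subst hc
      simp only [chkBackB, stackRun, List.isEmpty_nil, reduceIte, Char.reduceEq,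
        List.nil_append]
      rw [stackRun_split t (s + 1) [s]]
      have hnn := cntC_nonneg t
      rcases eq_or_lt_of_le hnn with h0 | hpos
      · have hnotpos : ¬ ((PySem.List.enumerate t (s + 1)).foldr chkBackB (0, m)).1 > 0 := by
          rw [hcnt]; omega
        simp only [if_neg hnotpos]
        have htake : [s].length - (cntC t).toNat = 1 := by
          simp only [List.length_cons, List.length_nil]
          omega
        rw [htake, List.take_of_length_le (by simp)]
        simp only [List.cons_append, List.nil_append, List.foldl_cons]
        rw [hm, foldlx_set _ _ _ hs]
        intro i hi
        rcases mem_stackRun t (s + 1) [] i hi with h | h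
        · simp at h
        · constructor <;> omega
      · have hppos : ((PySem.List.enumerate t (s + 1)).foldr chkBackB (0, m)).1 > 0 := by
          rw [hcnt]; omega
        simp only [if_pos hppos]
        have htake : [s].length - (cntC t).toNat = 0 := by
          simp only [List.length_cons, List.length_nil]
          omega
        rw [htake, List.take_zero, List.nil_append]
        exact hm
    · by_cases hc2 : c = ')'
      · simp only [chkBackB, hc2, if_pos rfl, stackRun, List.isEmpty_nil, if_neg hc, if_pos rfl]
        simpa [hc] using hm
      · simp only [chkBackB, stackRun, if_neg hc, if_neg hc2]
        exact hm

lemma per_string (cs : List Char) :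
    (let p := (PySem.List.enumerate cs 0).foldl chkStepA ([], List.replicate cs.length ' ')
     p.1.foldl (fun m i => PySem.List.pySetD m i 'x') p.2) =
    ((PySem.List.enumerate cs 0).foldr chkBackB
      (0, ((PySem.List.enumerate cs 0).foldl chkFwdB (0, List.replicate cs.length ' ')).2)).2 := by
  have hf := fwd_eq cs 0 [] 0 (List.replicate cs.length ' ') (by simp)
  have hb := back_eq cs 0 (((PySem.List.enumerate cs 0).foldl chkFwdB
    (0, List.replicate cs.length ' ')).2) (by omega)
  simp only [hf, hb]

lemma foldl_append_map {α β : Type} (g : α → β) :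
    ∀ (l : List α) (acc : List β), l.foldl (fun o s => o ++ [g s]) acc = acc ++ l.map g := by
  intro l
  induction l with
  | nil => simp
  | cons x l ih => intro acc; simp [ih]

-- ===== VERDICT (by name: the statement is the Claim_ definition above) =====
theorem check_parentheses_spec : Claim_equal_check_parentheses := by
  intro strings _
  unfold Spec_check_parentheses check_parentheses check_parentheses_alt
  rw [foldl_append_map]
  simp only [List.nil_append]
  congr 1
  funext string
  congr 1
  exact congrArg String.ofList (per_string string.toList)
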